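-- pv_equiv track=rewrite | github.com/yuvrajsinh5252/leetcode-cli | src/lib/problem_ui.py | _clean_example_text
-- ===== SOURCE A (Python) =====
-- def _clean_example_text(text: str) -> str:
--     """Remove any remaining example text from the formatted content"""
--     lines = []
--     skip_line = False
--
--     for line in text.split('\n'):
--         lower_line = line.lower()
--         # Skip example headers
--         if 'example' in lower_line and any(char.isdigit() for char in lower_line):
--             skip_line = True
--             continue
--
--         if not skip_line:
--             lines.append(line)
--
--         # Stop skipping after empty line
--         if skip_line and line.strip() == '':
--             skip_line = False
--
--     return '\n'.join(lines)
-- ===== SOURCE B (Python) =====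
-- def _clean_example_text(text: str) -> str:
--     lines = text.split('\n')
--     kept = []
--     n = len(lines)
--     i = 0
--     while i < n:
--         line = lines[i]
--         lower = line.lower()
--         if 'example' in lower and any(c.isdigit() for c in lower):
--             # consume the whole skip region locally: everything up to
--             # and including the next blank (stripped-empty) line
--             i += 1
--             while i < n and lines[i].strip() != '':
--                 i += 1
--             i += 1
--         else:
--             kept.append(line)
--             i += 1
--     return '\n'.join(kept)
-- ===== Notes on version B (the rewrite author's own statement) =====
-- stated objective: alternative
-- what changed: Replaces A's single pass with a carried skip_line boolean flag by an index-based outer while loop in which each example header locally consumes its whole skip region (up to and including the next blank line) with a nested inner while loop.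
import Mathlib
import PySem

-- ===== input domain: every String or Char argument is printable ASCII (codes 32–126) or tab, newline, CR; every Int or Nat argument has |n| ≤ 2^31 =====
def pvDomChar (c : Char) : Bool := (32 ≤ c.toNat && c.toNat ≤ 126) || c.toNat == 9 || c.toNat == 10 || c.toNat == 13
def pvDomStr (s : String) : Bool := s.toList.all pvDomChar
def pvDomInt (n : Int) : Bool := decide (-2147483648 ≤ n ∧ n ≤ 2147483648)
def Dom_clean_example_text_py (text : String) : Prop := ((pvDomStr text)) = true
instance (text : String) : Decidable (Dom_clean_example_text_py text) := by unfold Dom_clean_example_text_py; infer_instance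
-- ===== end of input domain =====

-- B replaces A's carried skip_line flag by nested iteration: each example header
-- consumes its skip region (up to and including the next blank line) locally (objective: simpler).

-- shared helpers: both Pythons compute line.lower() and the same two tests
-- 'example' in lower_line and any(char.isdigit() for char in lower_line)
def pvHeader (line : String) : Bool :=
  let lower_line := PySem.Str.lower line
  PySem.Str.isIn "example" lower_line && lower_line.toList.any PySem.Chars.isdigit

-- line.strip() == ''
def pvBlank (line : String) : Bool := PySem.Str.strip line == ""

-- text.split('\n'); the separator is nonempty so split? is always some (getD is never taken)
def pvLines (text : String) : List String := (PySem.Str.split? text "\n").getD []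

-- ===== PORT A =====
-- one step of A's for-loop over state (lines, skip_line)
def pvStepA (st : List String × Bool) (line : String) : List String × Bool :=
  if pvHeader line then (st.1, true)      -- skip_line = True; continue
  else
    let lines := if !st.2 then st.1 ++ [line] else st.1
    let skip := if st.2 && pvBlank line then false else st.2
    (lines, skip)

def clean_example_text_py (text : String) : String :=
  PySem.Str.join "\n" ((pvLines text).foldl pvStepA ([], false)).1

-- ===== PORT B =====
-- B's inner while loop: drop lines until a blank one is found, drop it too
def pvSkipB : List String → List String
  | [] => []
  | l :: rest => if pvBlank l then rest else pvSkipB rest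

theorem pvSkipB_length_le (ls : List String) : (pvSkipB ls).length ≤ ls.length := by
  induction ls with
  | nil => simp [pvSkipB]
  | cons l rest ih =>
    simp only [pvSkipB]
    split
    · simp
    · exact Nat.le_succ_of_le ih

-- B's outer loop, collecting the kept lines
def pvCleanB : List String → List String
  | [] => []
  | l :: rest =>
    if pvHeader l then pvCleanB (pvSkipB rest) else l :: pvCleanB rest
termination_by ls => ls.length
decreasing_by
  · exact Nat.lt_succ_of_le (pvSkipB_length_le rest)
  · simp

def clean_example_text_py_alt (text : String) : String :=
  PySem.Str.join "\n" (pvCleanB (pvLines text))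

-- ===== PRECONDITION & SPEC =====
def Spec_clean_example_text_py (text : String) (out : String) : Prop := out = clean_example_text_py_alt text
instance (text : String) (out : String) : Decidable (Spec_clean_example_text_py text out) := by unfold Spec_clean_example_text_py; infer_instance

-- ===== CLAIM (what is proved, stated in full; the proofs are below) =====
def Claim_equal_clean_example_text_py : Prop := ∀ (text : String), Dom_clean_example_text_py text → Spec_clean_example_text_py text (clean_example_text_py text)

-- ===== LEMMAS AND PROOFS =====

-- a char whose lowercase form is a digit is not whitespace
theorem pv_digit_lower_not_space (c : Char)
    (h : PySem.Chars.isdigit (PySem.Chars.lowerChar c) = true) :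
    PySem.Chars.isspace c = false := by
  have eA : ('A':Char).val.toNat = 65 := rfl
  have eZ : ('Z':Char).val.toNat = 90 := rfl
  have e0 : ('0':Char).val.toNat = 48 := rfl
  have e9 : ('9':Char).val.toNat = 57 := rfl
  have key : 48 ≤ c.toNat ∧ c.toNat ≤ 57 := by
    simp only [PySem.Chars.lowerChar, PySem.Chars.isupper] at h
    split at h
    · next hu =>
      exfalso
      simp only [decide_eq_true_eq, Bool.and_eq_true, Char.le_def, UInt32.le_iff_toNat_le, eA, eZ] at hu
      have hv : (Char.ofNat (c.toNat + 32)).toNat = c.toNat + 32 := by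
        unfold Char.ofNat
        split
        · rfl
        · next hnv => exfalso; apply hnv; constructor; simp only [Char.toNat]; omega
      simp only [PySem.Chars.isdigit, decide_eq_true_eq, Bool.and_eq_true, Char.le_def,
        UInt32.le_iff_toNat_le, e0, e9] at h
      simp only [Char.toNat] at hv h ⊢
      omega
    · simp only [PySem.Chars.isdigit, decide_eq_true_eq, Bool.and_eq_true, Char.le_def,
        UInt32.le_iff_toNat_le, e0, e9] at h
      exact h
  simp only [PySem.Chars.isspace]
  simp only [Bool.or_eq_false_iff, Bool.and_eq_false_iff, decide_eq_false_iff_not]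
  omega

-- an example header line is never stripped-empty
theorem pv_header_not_blank (l : String) (h : pvHeader l = true) : pvBlank l = false := by
  simp only [pvHeader, Bool.and_eq_true, List.any_eq_true] at h
  obtain ⟨-, c, hc, hd⟩ := h
  rw [PySem.Str.toList_lower, PySem.Chars.lower, List.mem_map] at hc
  obtain ⟨c0, hc0, rfl⟩ := hc
  by_contra hb
  have hb' : pvBlank l = true := by revert hb; cases pvBlank l <;> simp
  -- blank means strip is empty, hence every char of l is whitespace
  simp only [pvBlank, beq_iff_eq] at hb'
  have hnil : PySem.Chars.strip l.toList = [] := by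
    rw [← PySem.Str.toList_strip, hb']; rfl
  have hall : ∀ x ∈ l.toList, PySem.Chars.isspace x = true := by
    simp only [PySem.Chars.strip, PySem.Chars.rstrip, PySem.Chars.lstrip] at hnil
    have h2 : List.dropWhile PySem.Chars.isspace (List.dropWhile PySem.Chars.isspace l.toList).reverse = [] := by
      by_contra hne
      exact hne (by simpa using congrArg List.reverse hnil)
    rw [List.dropWhile_eq_nil_iff] at h2
    intro x hx
    rw [← List.takeWhile_append_dropWhile (p := PySem.Chars.isspace) (l := l.toList)] at hx
    rcases List.mem_append.1 hx with h' | h'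
    · exact List.mem_takeWhile_imp h'
    · exact h2 x (List.mem_reverse.2 h')
  exact absurd (hall c0 hc0) (by simp [pv_digit_lower_not_space c0 hd])

-- A's fold in skipping state = A's fold in normal state on the locally-skipped tail
theorem pvFoldA_true (ls : List String) (acc : List String) :
    ((ls.foldl pvStepA (acc, true)).1 : List String) = ((pvSkipB ls).foldl pvStepA (acc, false)).1 := by
  induction ls generalizing acc with
  | nil => simp [pvSkipB]
  | cons l rest ih =>
    by_cases hh : pvHeader l
    · have hb := pv_header_not_blank l hh
      simp [pvSkipB, List.foldl_cons, pvStepA, hh, hb, ih]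
    · by_cases hb : pvBlank l
      · simp [pvSkipB, List.foldl_cons, pvStepA, hh, hb]
      · simp [pvSkipB, List.foldl_cons, pvStepA, hh, hb, ih]

-- A's fold in normal state produces exactly B's kept lines
theorem pvFoldA_false : ∀ (ls : List String) (acc : List String),
    ((ls.foldl pvStepA (acc, false)).1 : List String) = acc ++ pvCleanB ls
  | [], acc => by simp [pvCleanB]
  | l :: rest, acc => by
    unfold pvCleanB
    by_cases hh : pvHeader l
    · rw [List.foldl_cons]
      simp only [pvStepA, hh, if_pos]
      rw [pvFoldA_true rest acc, pvFoldA_false (pvSkipB rest) acc]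
    · simp [List.foldl_cons, pvStepA, hh, pvFoldA_false rest (acc ++ [l])]
termination_by ls => ls.length
decreasing_by
  · exact Nat.lt_succ_of_le (pvSkipB_length_le rest)
  · simp

-- ===== VERDICT (by name: the statement is the Claim_ definition above) =====
theorem clean_example_text_py_spec : Claim_equal_clean_example_text_py := by
  intro text _
  unfold Spec_clean_example_text_py clean_example_text_py clean_example_text_py_alt
  rw [pvFoldA_false]
  rfl
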